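-- pv_equiv track=rewrite | github.com/qMarkEr/Simplex | simplex.py | CalcDeltas
-- ===== SOURCE A (Python) =====
-- def getVector(A, index):
--     return [i[index] for i in A]
--
-- def dot(x, y):
--     return sum([i * j for (i, j) in zip(x, y)])
--
-- def CalcDeltas(A, c, basis):
--     d = [0 for _ in range(len(A[0]))]
--     CB = []
--     for j in basis:
--         CB.append(c[j])
--
--     for j in range(len(d)):
--         temp_vector = getVector(A, j)
--         d[j] = dot(temp_vector, CB) - c[j]
--     return d
-- ===== SOURCE B (Python) =====
-- def CalcDeltas(A, c, basis):
--     CB = [c[j] for j in basis]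
--     d = [0] * len(A[0])
--     for row, cb in zip(A, CB):
--         d = [di + rj * cb for di, rj in zip(d, row)]
--     return [di - ci for di, ci in zip(d, c)]
-- ===== Notes on version B (the rewrite author's own statement) =====
-- stated objective: alternative
-- what changed: Row-major single sweep: accumulate every column sum while walking the matrix once row by row (rebuilding d functionally), then subtract c in one final pass, instead of extracting each column and dotting it with CB separately.
import Mathlib
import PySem

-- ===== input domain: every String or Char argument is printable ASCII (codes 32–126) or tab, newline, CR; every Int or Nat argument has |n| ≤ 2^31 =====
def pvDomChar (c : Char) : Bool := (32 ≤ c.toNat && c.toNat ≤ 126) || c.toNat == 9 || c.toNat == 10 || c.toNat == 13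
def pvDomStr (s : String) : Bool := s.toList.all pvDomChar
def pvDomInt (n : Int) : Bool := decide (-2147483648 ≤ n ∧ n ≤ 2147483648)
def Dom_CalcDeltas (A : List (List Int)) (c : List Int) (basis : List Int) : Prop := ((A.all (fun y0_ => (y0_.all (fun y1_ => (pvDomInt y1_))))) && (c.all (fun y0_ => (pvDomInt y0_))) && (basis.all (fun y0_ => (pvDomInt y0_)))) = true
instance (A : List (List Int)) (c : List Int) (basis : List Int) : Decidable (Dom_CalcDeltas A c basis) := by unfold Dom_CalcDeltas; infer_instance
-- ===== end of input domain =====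

-- B replaces A's per-column extract-and-dot with a single row-major sweep that
-- accumulates all column sums at once and subtracts c in a final pass (alternative decomposition).


-- ===== PORT A =====
-- getVector(A, index) = [i[index] for i in A]
def pvGetVector (A : List (List Int)) (index : Int) : List Int :=
  A.map (fun i => PySem.List.pyGetD i index 0)

-- dot(x, y) = sum([i*j for (i,j) in zip(x,y)])
def pvDot (x y : List Int) : Int :=
  ((x.zip y).map (fun p => p.1 * p.2)).sum

def CalcDeltas (A : List (List Int)) (c : List Int) (basis : List Int) : List Int :=
  -- d = [0 for _ in range(len(A[0]))]
  let d : List Int := (PySem.List.pyRange 0 ((PySem.List.pyGetD A 0 []).length : Int) 1).map (fun _ => (0 : Int))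
  -- CB = []; for j in basis: CB.append(c[j])
  let CB : List Int := basis.foldl (fun acc j => acc ++ [PySem.List.pyGetD c j 0]) []
  -- for j in range(len(d)): d[j] = dot(getVector(A, j), CB) - c[j]
  (PySem.List.pyRange 0 (d.length : Int) 1).foldl
    (fun acc j => PySem.List.pySetD acc j (pvDot (pvGetVector A j) CB - PySem.List.pyGetD c j 0)) d

-- ===== PORT B =====
def CalcDeltas_alt (A : List (List Int)) (c : List Int) (basis : List Int) : List Int :=
  let CB : List Int := basis.map (fun j => PySem.List.pyGetD c j 0)
  let d0 : List Int := List.replicate (PySem.List.pyGetD A 0 []).length (0 : Int)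
  let d := (A.zip CB).foldl (fun d rc => (d.zip rc.1).map (fun p => p.1 + p.2 * rc.2)) d0
  (d.zip c).map (fun p => p.1 - p.2)

-- ===== PRECONDITION & SPEC =====
-- Pre_ is exactly where Python A returns: A nonempty (A[0]), every basis index valid for c
-- (negative wraparound allowed), every row at least len(A[0]) long (getVector), len(A[0]) ≤ len(c).
def Pre_CalcDeltas (A : List (List Int)) (c : List Int) (basis : List Int) : Prop :=
  A ≠ [] ∧ (∀ j ∈ basis, PySem.Raise.InRange c.length j) ∧
  (∀ row ∈ A, A.headI.length ≤ row.length) ∧ A.headI.length ≤ c.length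
instance (A : List (List Int)) (c : List Int) (basis : List Int) : Decidable (Pre_CalcDeltas A c basis) := by unfold Pre_CalcDeltas; infer_instance

def pvWitness_CalcDeltas : List (List Int) × List Int × List Int := ([[1, 2], [3, 4]], [5, 6], [0, -1])

def Spec_CalcDeltas (A : List (List Int)) (c : List Int) (basis : List Int) (out : List Int) : Prop := out = CalcDeltas_alt A c basis
instance (A : List (List Int)) (c : List Int) (basis : List Int) (out : List Int) : Decidable (Spec_CalcDeltas A c basis out) := by unfold Spec_CalcDeltas; infer_instance

-- ===== CLAIM (what is proved, stated in full; the proofs are below) =====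
def Claim_equal_CalcDeltas : Prop := ∀ (A : List (List Int)) (c : List Int) (basis : List Int), Dom_CalcDeltas A c basis → Pre_CalcDeltas A c basis → Spec_CalcDeltas A c basis (CalcDeltas A c basis)

-- ===== LEMMAS AND PROOFS =====

-- A's assignment loop 'for j in range(len(d)): d[j] = g(j)' overwrites every slot once, in order.
theorem foldl_pySetD_range_aux (g : Int → Int) (p d : List Int) :
    (PySem.List.pyRange (p.length : Int) ((p.length : Int) + (d.length : Int)) 1).foldl
      (fun acc j => PySem.List.pySetD acc j (g j)) (p ++ d)
    = p ++ (List.range d.length).map (fun k : Nat => g ((p.length : Int) + (k : Int))) := by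
  induction d generalizing p with
  | nil => simp [PySem.List.pyRange_one_eq_nil]
  | cons x t ih =>
    rw [PySem.List.pyRange_one_cons (by simp)]
    simp only [List.foldl_cons]
    have hset : PySem.List.pySetD (p ++ x :: t) (p.length : Int) (g (p.length : Int))
        = (p ++ [g (p.length : Int)]) ++ t := by
      rw [PySem.List.pySetD_natCast]
      simp
    rw [hset]
    have h1 : ((p.length : Int) + 1) = (((p ++ [g (p.length : Int)]).length : Int)) := by
      simp
    have h2 : ((p.length : Int) + ((x :: t).length : Int))
        = (((p ++ [g (p.length : Int)]).length : Int)) + (t.length : Int) := by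
      simp; ring
    rw [h1, h2, ih]
    simp only [List.length_append, List.length_cons, List.length_nil,
      List.range_succ_eq_map, List.map_cons, List.map_map, List.append_assoc,
      List.cons_append, List.nil_append]
    congr 1
    congr 1
    simp only [List.map_inj_left]
    intro a _
    congr 1
    push_cast; ring

theorem foldl_pySetD_range (g : Int → Int) (d : List Int) :
    (PySem.List.pyRange 0 ((d.length : Int)) 1).foldl
      (fun acc j => PySem.List.pySetD acc j (g j)) d
    = (List.range d.length).map (fun k : Nat => g (k : Int)) := by
  have := foldl_pySetD_range_aux g [] d
  simpa using this

-- B's inner comprehension on a length-n map, against a row of length ≥ n.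
theorem zip_map_range (n : Nat) (h : Nat → Int) (row : List Int) (cb : Int)
    (hrow : n ≤ row.length) :
    (((List.range n).map h).zip row).map (fun p => p.1 + p.2 * cb)
    = (List.range n).map (fun k => h k + row.getD k 0 * cb) := by
  apply List.ext_getElem
  · simp; omega
  · intro k h1 h2
    simp only [List.getElem_map, List.getElem_zip, List.getElem_range]
    have hk : k < n := by simp at h1; omega
    rw [List.getD_eq_getElem _ _ (by omega)]

-- B's outer row sweep accumulates, per column k, the sum of row[k]*cb over the zipped rows.
theorem foldl_rows (L : List (List Int × Int)) (n : Nat) (h : Nat → Int)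
    (hL : ∀ rc ∈ L, n ≤ rc.1.length) :
    L.foldl (fun d rc => (d.zip rc.1).map (fun p => p.1 + p.2 * rc.2)) ((List.range n).map h)
    = (List.range n).map (fun k => h k + (L.map (fun rc => rc.1.getD k 0 * rc.2)).sum) := by
  induction L generalizing h with
  | nil => simp
  | cons rc t ih =>
    simp only [List.foldl_cons]
    rw [zip_map_range n h rc.1 rc.2 (hL rc (by simp))]
    rw [ih (fun k => h k + rc.1.getD k 0 * rc.2) (fun x hx => hL x (by simp [hx]))]
    apply List.map_congr_left; intro k _
    simp [add_assoc]

-- A's column dot as a sum over the zipped rows.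
theorem dot_getVector (A : List (List Int)) (CB : List Int) (k : Nat) :
    pvDot (pvGetVector A (k : Int)) CB
    = ((A.zip CB).map (fun rc => rc.1.getD k 0 * rc.2)).sum := by
  unfold pvDot pvGetVector
  rw [List.zip_map_left, List.map_map]
  congr 1
  apply List.map_congr_left; intro rc _
  simp [PySem.List.pyGetD_natCast]

-- ===== VERDICT (by name: the statement is the Claim_ definition above) =====
theorem CalcDeltas_spec : Claim_equal_CalcDeltas := by
  unfold Claim_equal_CalcDeltas
  intro A c basis _ hpre
  obtain ⟨hne, _, hrows, hc⟩ := hpre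
  obtain ⟨r, A', rfl⟩ := List.exists_cons_of_ne_nil hne
  simp only [List.headI] at hrows hc
  unfold Spec_CalcDeltas
  simp only [CalcDeltas, CalcDeltas_alt]
  have hget0 : PySem.List.pyGetD (r :: A') 0 ([] : List Int) = r := by
    simp [PySem.List.pyGetD_zero_cons]
  rw [hget0]
  have hCBa : basis.foldl (fun acc j => acc ++ [PySem.List.pyGetD c j 0]) ([] : List Int)
      = basis.map (fun j => PySem.List.pyGetD c j 0) := by
    rw [PySem.List.foldl_append_singleton_eq_map]; simp
  rw [hCBa]
  set CB : List Int := basis.map (fun j => PySem.List.pyGetD c j 0) with hCB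
  have hd0 : (PySem.List.pyRange 0 ((r.length : Nat) : Int) 1).map (fun _ => (0 : Int))
      = List.replicate r.length 0 := by
    apply List.ext_getElem <;> simp [PySem.List.length_pyRange_one]
  rw [hd0]
  -- A side: the assignment loop is a map over range n
  have hA := foldl_pySetD_range
    (fun j => pvDot (pvGetVector (r :: A') j) CB - PySem.List.pyGetD c j 0)
    (List.replicate r.length 0)
  simp only [List.length_replicate] at hA ⊢
  rw [hA]
  -- B side: the row sweep then the final subtraction pass
  have hrepl : List.replicate r.length (0 : Int) = (List.range r.length).map (fun _ => (0 : Int)) := by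
    apply List.ext_getElem <;> simp
  rw [hrepl]
  rw [foldl_rows ((r :: A').zip CB) r.length (fun _ => (0 : Int))
    (by rintro ⟨row, cb⟩ hrc
        exact hrows row (List.of_mem_zip hrc).1)]
  -- final pass: zip with c and subtract
  apply List.ext_getElem
  · simp
    omega
  · intro k h1 h2
    simp only [List.length_map, List.length_range] at h1
    simp only [List.getElem_map, List.getElem_zip, List.getElem_range]
    rw [dot_getVector]
    rw [PySem.List.pyGetD_natCast]
    rw [List.getD_eq_getElem c 0 (by omega : k < c.length)]
    ring
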